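-- pv_equiv track=rewrite | github.com/gerthjaanimae/csmt-parish-court-records | scripts/annotate_corpus.py | find_sentence_boundaries
-- ===== SOURCE A (Python) =====
-- def find_sentence_boundaries( text ):
--
--     assert isinstance(text, str)
--     text+="\n"
--     results = []
--     start = 0
--     for char_id, char in enumerate(text):
--         if char == '\n':
--            end = char_id
--            # Except sometimes there are tabs in the beginning of sentences
--            # Shift the beginning of sentence
--            while start < end:
--                start_char = text[start]
--                if not start_char.isspace():
--                    break
--                start += 1
--            # Sometimes there is a tab after sentence boundary
--            while start < end-1:
--                end_char = text[end-1]
--                if not end_char.isspace():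
--                    break
--                end -= 1
--            if start < end:
--                results.append( (start, end) )
--            start = end + 1
--     return results
-- ===== SOURCE B (Python) =====
-- def find_sentence_boundaries(text):
--     assert isinstance(text, str)
--     results = []
--     offset = 0
--     for seg in text.split('\n'):
--         stripped = seg.strip()
--         if stripped:
--             left = offset + len(seg) - len(seg.lstrip())
--             results.append((left, left + len(stripped)))
--         offset += len(seg) + 1
--     return results
-- ===== Notes on version B (the rewrite author's own statement) =====
-- stated objective: simpler
-- what changed: Replaces the single char-scan with inner while-loop pointer walks by a two-phase pass: split the text into lines and, per line with a running offset, compute the trimmed span via strip/lstrip lengths.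
import Mathlib
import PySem

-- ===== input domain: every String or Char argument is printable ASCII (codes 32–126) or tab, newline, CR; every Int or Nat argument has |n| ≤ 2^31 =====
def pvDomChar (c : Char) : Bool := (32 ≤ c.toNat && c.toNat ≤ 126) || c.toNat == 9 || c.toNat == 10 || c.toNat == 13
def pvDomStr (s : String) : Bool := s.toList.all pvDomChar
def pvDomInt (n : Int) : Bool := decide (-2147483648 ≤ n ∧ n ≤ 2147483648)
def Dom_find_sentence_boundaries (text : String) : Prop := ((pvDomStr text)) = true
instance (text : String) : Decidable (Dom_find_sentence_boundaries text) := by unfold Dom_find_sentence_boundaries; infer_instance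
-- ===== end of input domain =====

-- B replaces A's single character scan with inner while-loop pointer walks by a two-phase
-- pass (split into lines, then per line compute the trimmed span from strip/lstrip lengths);
-- objective: simpler.

-- ===== PORT A =====
-- the inner 'while start < end: … start += 1' loop shifting start over whitespace
def pvTrimL (cs : List Char) (s e : Nat) : Nat :=
  if _h : s < e then
    if PySem.Chars.isspace (cs.getD s ' ') then pvTrimL cs (s + 1) e else s
  else s
termination_by e - s

-- the inner 'while start < end-1: … end -= 1' loop shifting end back over whitespace
def pvTrimR (cs : List Char) (s e : Nat) : Nat :=
  if _h : s < e - 1 then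
    if PySem.Chars.isspace (cs.getD (e - 1) ' ') then pvTrimR cs s (e - 1) else e
  else e
termination_by e
decreasing_by omega

-- the 'for char_id, char in enumerate(text)' loop; cs is the whole text (for text[start], text[end-1])
def pvLoopA (cs : List Char) : List Char → Nat → Nat → List (Int × Int) → List (Int × Int)
  | [], _, _, res => res
  | c :: rest, i, start, res =>
    if c = '\n' then
      let e := i
      let s' := pvTrimL cs start e
      let e' := pvTrimR cs s' e
      let res' := if s' < e' then res ++ [((s' : Int), (e' : Int))] else res
      pvLoopA cs rest (i + 1) (e' + 1) res'
    else
      pvLoopA cs rest (i + 1) start res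

def find_sentence_boundaries (text : String) : List (Int × Int) :=
  let cs := text.toList ++ ['\n']   -- text += "\n"
  pvLoopA cs cs 0 0 []

-- ===== PORT B =====
-- the 'for seg in text.split('\n')' loop with running offset
def pvLoopB : List (List Char) → Nat → List (Int × Int) → List (Int × Int)
  | [], _, res => res
  | seg :: rest, off, res =>
    let stripped := PySem.Chars.strip seg
    let res' :=
      if stripped ≠ [] then
        let left := off + (seg.length - (PySem.Chars.lstrip seg).length)
        res ++ [((left : Int), ((left + stripped.length : Nat) : Int))]
      else res
    pvLoopB rest (off + seg.length + 1) res'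

def find_sentence_boundaries_alt (text : String) : List (Int × Int) :=
  pvLoopB (PySem.Chars.splitOn text.toList ['\n']) 0 []

-- ===== PRECONDITION & SPEC =====
def Spec_find_sentence_boundaries (text : String) (out : List (Int × Int)) : Prop := out = find_sentence_boundaries_alt text
instance (text : String) (out : List (Int × Int)) : Decidable (Spec_find_sentence_boundaries text out) := by unfold Spec_find_sentence_boundaries; infer_instance

-- ===== CLAIM (what is proved, stated in full; the proofs are below) =====
def Claim_equal_find_sentence_boundaries : Prop := ∀ (text : String), Dom_find_sentence_boundaries text → Spec_find_sentence_boundaries text (find_sentence_boundaries text)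

-- ===== LEMMAS AND PROOFS =====

-- simple split of a char list at every '\n' (proof-only reference model of splitOn)
def pvSplitP : List Char → List Char × List (List Char)
  | [] => ([], [])
  | c :: r =>
    let p := pvSplitP r
    if c = '\n' then ([], p.1 :: p.2) else (c :: p.1, p.2)

def pvGlue (segs : List (List Char)) : List Char := (segs.map (· ++ ['\n'])).flatten

lemma pvGlue_cons (seg : List Char) (rest : List (List Char)) :
    pvGlue (seg :: rest) = seg ++ '\n' :: pvGlue rest := by
  simp [pvGlue]

lemma pv_go_spec : ∀ (fuel : Nat) (l cur : List Char) (acc : List (List Char)),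
    l.length ≤ fuel →
    PySem.Chars.splitOn.go ['\n'] fuel l cur acc =
      acc.reverse ++ (cur.reverse ++ (pvSplitP l).1) :: (pvSplitP l).2 := by
  intro fuel
  induction fuel with
  | zero =>
    intro l cur acc h
    have : l = [] := by cases l <;> simp_all
    subst this
    simp [PySem.Chars.splitOn.go, pvSplitP]
  | succ n ih =>
    intro l cur acc h
    cases l with
    | nil => simp [PySem.Chars.splitOn.go, pvSplitP]
    | cons c rest =>
      have hlen : rest.length ≤ n := by
        simp only [List.length_cons] at h
        omega
      by_cases hc : c = '\n'
      · subst hc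
        rw [PySem.Chars.splitOn.go]
        have hpre : (['\n'].isPrefixOf ('\n' :: rest)) = true := by
          simp [List.isPrefixOf]
        rw [if_pos hpre]
        have hdrop : List.drop (['\n'] : List Char).length ('\n' :: rest) = rest := by simp
        rw [hdrop]
        rw [ih rest [] (cur.reverse :: acc) hlen]
        simp [pvSplitP]
      · rw [PySem.Chars.splitOn.go]
        have hpre : (['\n'].isPrefixOf (c :: rest)) = false := by
          simp [List.isPrefixOf]
          exact fun h' => hc h'.symm
        rw [if_neg (by simp [hpre])]
        rw [ih rest (c :: cur) acc hlen]
        simp [pvSplitP, hc]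

lemma pv_splitOn_eq (cs : List Char) :
    PySem.Chars.splitOn cs ['\n'] = (pvSplitP cs).1 :: (pvSplitP cs).2 := by
  rw [PySem.Chars.splitOn]
  rw [pv_go_spec (cs.length + 1) cs [] [] (by omega)]
  simp

lemma pv_glue_splitP : ∀ cs : List Char, pvGlue ((pvSplitP cs).1 :: (pvSplitP cs).2) = cs ++ ['\n'] := by
  intro cs
  induction cs with
  | nil => simp [pvSplitP, pvGlue]
  | cons c r ih =>
    by_cases hc : c = '\n'
    · subst hc
      have h1 : pvSplitP ('\n' :: r) = ([], (pvSplitP r).1 :: (pvSplitP r).2) := by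
        simp [pvSplitP]
      rw [h1, pvGlue_cons, ih]
      simp
    · simp only [pvSplitP, if_neg hc]
      have hstep : pvGlue ((c :: (pvSplitP r).1) :: (pvSplitP r).2) =
          c :: pvGlue ((pvSplitP r).1 :: (pvSplitP r).2) := by
        rw [pvGlue_cons, pvGlue_cons]
        simp
      rw [hstep, ih]
      simp

lemma pv_no_nl : ∀ (cs : List Char) (seg : List Char),
    seg ∈ (pvSplitP cs).1 :: (pvSplitP cs).2 → '\n' ∉ seg := by
  intro cs
  induction cs with
  | nil => intro seg hseg; simp [pvSplitP] at hseg; simp [hseg]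
  | cons c r ih =>
    intro seg hseg
    by_cases hc : c = '\n'
    · subst hc
      simp only [pvSplitP, if_pos rfl] at hseg
      rcases List.mem_cons.mp hseg with h | h
      · simp [h]
      · exact ih seg h
    · simp only [pvSplitP, if_neg hc] at hseg
      rcases List.mem_cons.mp hseg with h | h
      · subst h
        intro hmem
        rcases List.mem_cons.mp hmem with h' | h'
        · exact hc h'.symm
        · exact ih (pvSplitP r).1 (List.mem_cons_self) h'
      · exact ih seg (List.mem_cons_of_mem _ h)

-- skipping non-newline characters only advances the index
lemma pv_loopA_skip (cs : List Char) : ∀ (seg rest : List Char), '\n' ∉ seg →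
    ∀ (i start : Nat) (res : List (Int × Int)),
    pvLoopA cs (seg ++ rest) i start res = pvLoopA cs rest (i + seg.length) start res := by
  intro seg
  induction seg with
  | nil => intro rest _ i start res; simp
  | cons c tl ih =>
    intro rest hnl i start res
    have hc : ¬ (c = '\n') := fun h => hnl (h ▸ List.mem_cons_self)
    simp only [List.cons_append, pvLoopA, if_neg hc]
    rw [ih rest (fun h => hnl (List.mem_cons_of_mem _ h)) (i + 1) start res]
    congr 1
    simp only [List.length_cons]
    omega

lemma pv_trimL_skip (cs : List Char) (s t e : Nat) (hst : s ≤ t) (hte : t ≤ e)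
    (hws : ∀ j, s ≤ j → j < t → PySem.Chars.isspace (cs.getD j ' ') = true) :
    pvTrimL cs s e = pvTrimL cs t e := by
  obtain ⟨n, hn⟩ : ∃ n, t = s + n := ⟨t - s, by omega⟩
  subst hn
  clear hst
  induction n generalizing s with
  | zero => rfl
  | succ n ih =>
    have hlt : s < e := by omega
    rw [pvTrimL, dif_pos hlt, if_pos (hws s le_rfl (by omega))]
    have := ih (s + 1) (by omega) (fun j h1 h2 => hws j (by omega) (by omega))
    rw [this]
    congr 1
    omega

lemma pv_trimL_spec (cs : List Char) : ∀ (seg pre suf : List Char), cs = pre ++ seg ++ suf →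
    pvTrimL cs pre.length (pre.length + seg.length) =
      pre.length + (seg.length - (PySem.Chars.lstrip seg).length) := by
  intro seg
  induction seg with
  | nil =>
    intro pre suf hcs
    rw [pvTrimL]
    simp [PySem.Chars.lstrip]
  | cons c tl ih =>
    intro pre suf hcs
    have hget : cs.getD pre.length ' ' = c := by
      rw [hcs, List.append_assoc, List.getD_append_right _ _ _ _ le_rfl]
      simp
    by_cases hc : PySem.Chars.isspace c
    · rw [pvTrimL, dif_pos (by simp), hget, if_pos hc]
      have hcs' : cs = (pre ++ [c]) ++ tl ++ suf := by simp [hcs]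
      have hrec := ih (pre ++ [c]) suf hcs'
      simp only [List.length_append, List.length_singleton] at hrec
      have harg : pre.length + (c :: tl).length = pre.length + 1 + tl.length := by
        simp only [List.length_cons]
        omega
      rw [harg, hrec]
      have hls : (PySem.Chars.lstrip (c :: tl)) = PySem.Chars.lstrip tl := by
        simp [PySem.Chars.lstrip, List.dropWhile_cons, hc]
      rw [hls]
      have hle : (PySem.Chars.lstrip tl).length ≤ tl.length := List.length_dropWhile_le _ _
      simp only [List.length_cons]
      omega
    · rw [pvTrimL, dif_pos (by simp), hget, if_neg hc]
      have hls : (PySem.Chars.lstrip (c :: tl)) = c :: tl := by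
        simp [PySem.Chars.lstrip, List.dropWhile_cons, hc]
      rw [hls]
      omega

lemma pv_rstrip_concat (ms : List Char) (y : Char) :
    PySem.Chars.rstrip (ms ++ [y]) =
      if PySem.Chars.isspace y then PySem.Chars.rstrip ms else ms ++ [y] := by
  simp only [PySem.Chars.rstrip, List.reverse_append, List.reverse_singleton,
    List.singleton_append, List.dropWhile_cons]
  by_cases hy : PySem.Chars.isspace y
  · simp [hy]
  · simp [hy]

lemma pv_rstrip_length_le (ms : List Char) :
    (PySem.Chars.rstrip ms).length ≤ ms.length := by
  simp only [PySem.Chars.rstrip, List.length_reverse]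
  have := List.length_dropWhile_le PySem.Chars.isspace ms.reverse
  simpa using this

lemma pv_trimR_spec (cs : List Char) : ∀ (mid pre suf : List Char), cs = pre ++ mid ++ suf →
    (∀ h : mid ≠ [], PySem.Chars.isspace (mid.head h) = false) →
    pvTrimR cs pre.length (pre.length + mid.length) =
      pre.length + (PySem.Chars.rstrip mid).length := by
  intro mid
  induction mid using List.reverseRecOn with
  | nil =>
    intro pre suf _ _
    rw [pvTrimR]
    simp [PySem.Chars.rstrip]
  | append_singleton ms y ih =>
    intro pre suf hcs hhead
    have hget : cs.getD (pre.length + ms.length) ' ' = y := by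
      rw [hcs]
      have hre : pre ++ (ms ++ [y]) ++ suf = (pre ++ ms) ++ (y :: suf) := by simp
      rw [hre, List.getD_append_right _ _ _ _ (by simp)]
      simp
    cases ms with
    | nil =>
      -- single-character segment: loop guard start < end-1 fails immediately
      have hy : PySem.Chars.isspace y = false := by
        have := hhead (by simp)
        simpa using this
      rw [pvTrimR, dif_neg (by simp)]
      have hr : PySem.Chars.rstrip ([] ++ [y]) = [y] := by
        simp [PySem.Chars.rstrip, List.dropWhile_cons, hy]
      rw [hr]
      simp
    | cons m0 mtl =>
      set ms' := m0 :: mtl with hms'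
      have hpos : 0 < ms'.length := by rw [hms']; simp
      have hlen : (ms' ++ [y]).length = ms'.length + 1 := by simp
      have hcond : pre.length < pre.length + (ms' ++ [y]).length - 1 := by
        rw [hlen]; omega
      have harg : pre.length + (ms' ++ [y]).length - 1 = pre.length + ms'.length := by
        rw [hlen]
        omega
      by_cases hy : PySem.Chars.isspace y
      · rw [pvTrimR, dif_pos hcond, harg, hget, if_pos hy]
        have hcs' : cs = pre ++ ms' ++ ([y] ++ suf) := by simp [hcs]
        have hhead' : ∀ h : ms' ≠ [], PySem.Chars.isspace (ms'.head h) = false := by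
          intro h
          have := hhead (by simp)
          simpa [List.head_append_of_ne_nil] using this
        rw [ih pre ([y] ++ suf) hcs' hhead']
        rw [pv_rstrip_concat, if_pos hy]
      · rw [pvTrimR, dif_pos hcond, harg, hget, if_neg hy]
        rw [pv_rstrip_concat, if_neg hy]

-- every character of mid past its rstrip is whitespace
lemma pv_rstrip_ws (mid : List Char) (j : Nat)
    (h1 : (PySem.Chars.rstrip mid).length ≤ j) (h2 : j < mid.length) :
    PySem.Chars.isspace (mid.getD j ' ') = true := by
  have hdecomp : mid = PySem.Chars.rstrip mid ++ (mid.reverse.takeWhile PySem.Chars.isspace).reverse := by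
    simp only [PySem.Chars.rstrip]
    conv_rhs => rw [← List.reverse_append, List.takeWhile_append_dropWhile, List.reverse_reverse]
  set P := PySem.Chars.rstrip mid with hP
  set Q := (mid.reverse.takeWhile PySem.Chars.isspace).reverse with hQ
  have hlen : mid.length = P.length + Q.length := by
    conv_lhs => rw [hdecomp]
    simp
  have hjq : j - P.length < Q.length := by omega
  have hget : mid.getD j ' ' = Q.getD (j - P.length) ' ' := by
    conv_lhs => rw [hdecomp]
    rw [List.getD_append_right _ _ _ _ (by omega)]
  rw [hget]
  have hmem : Q.getD (j - P.length) ' ' ∈ Q := by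
    rw [List.getD_eq_getElem _ _ hjq]
    exact List.getElem_mem _
  have hmem' : Q.getD (j - P.length) ' ' ∈ mid.reverse.takeWhile PySem.Chars.isspace := by
    rw [hQ] at hmem
    exact List.mem_reverse.mp hmem
  exact List.mem_takeWhile_imp hmem'

lemma pv_lstrip_head (seg : List Char) (h : PySem.Chars.lstrip seg ≠ []) :
    PySem.Chars.isspace ((PySem.Chars.lstrip seg).head h) = false :=
  List.head_dropWhile_not _ h

-- the main loop correspondence: A's char scan over glued segments equals B's per-segment fold
lemma pv_main (cs : List Char) : ∀ (segs : List (List Char)) (pre : List Char) (s : Nat)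
    (res : List (Int × Int)),
    cs = pre ++ pvGlue segs →
    (∀ seg ∈ segs, '\n' ∉ seg) →
    s ≤ pre.length →
    (∀ j, s ≤ j → j < pre.length → PySem.Chars.isspace (cs.getD j ' ') = true) →
    pvLoopA cs (pvGlue segs) pre.length s res = pvLoopB segs pre.length res := by
  intro segs
  induction segs with
  | nil => intro pre s res _ _ _ _; simp [pvGlue, pvLoopA, pvLoopB]
  | cons seg rest ih =>
    intro pre s res hcs hnl hs hws
    rw [pvGlue_cons] at hcs ⊢
    rw [pv_loopA_skip cs seg _ (hnl seg List.mem_cons_self)]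
    set wsP := seg.takeWhile PySem.Chars.isspace with hwsP
    set mid := PySem.Chars.lstrip seg with hmid
    have hsegdec : seg = wsP ++ mid := (List.takeWhile_append_dropWhile).symm
    have hmidlen : mid.length ≤ seg.length := by rw [hmid]; exact List.length_dropWhile_le _ _
    have hseglen : seg.length = wsP.length + mid.length := by
      conv_lhs => rw [hsegdec]
      simp
    -- one step of A at the '\n'
    simp only [pvLoopA, eq_self_iff_true, if_true]
    -- the two inner trim loops compute lstrip/strip lengths
    have htrimL0 : pvTrimL cs s (pre.length + seg.length) =
        pvTrimL cs pre.length (pre.length + seg.length) :=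
      pv_trimL_skip cs s pre.length _ hs (by omega) hws
    have htrimL : pvTrimL cs pre.length (pre.length + seg.length) =
        pre.length + (seg.length - mid.length) := by
      rw [hmid, pv_trimL_spec cs seg pre ('\n' :: pvGlue rest) (by rw [hcs]; simp)]
    have hwsPlen : seg.length - mid.length = wsP.length := by omega
    have hcs2 : cs = (pre ++ wsP) ++ mid ++ ('\n' :: pvGlue rest) := by
      rw [hcs]
      conv_lhs => rw [hsegdec]
      simp
    have hstrip : PySem.Chars.strip seg = PySem.Chars.rstrip mid := by
      rw [PySem.Chars.strip, hmid]
    obtain ⟨rsl, hrsl⟩ : ∃ r, (PySem.Chars.rstrip mid).length = r := ⟨_, rfl⟩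
    have htrimR : pvTrimR cs (pre.length + wsP.length) (pre.length + seg.length) =
        pre.length + wsP.length + rsl := by
      have h0 := pv_trimR_spec cs mid (pre ++ wsP) ('\n' :: pvGlue rest) hcs2
        (fun h => pv_lstrip_head seg h)
      simp only [List.length_append] at h0
      rw [hrsl] at h0
      have harg2 : pre.length + seg.length = pre.length + wsP.length + mid.length := by omega
      rw [harg2]
      exact h0
    have hrle : rsl ≤ mid.length := hrsl ▸ pv_rstrip_length_le mid
    rw [htrimL0, htrimL, hwsPlen, htrimR]
    -- one step of B
    rw [pvLoopB]
    -- the common continuation (induction hypothesis with pre' = pre ++ seg ++ ['\n'])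
    have hcs' : cs = (pre ++ seg ++ ['\n']) ++ pvGlue rest := by
      rw [hcs]
      simp
    have hcont : ∀ res' : List (Int × Int),
        pvLoopA cs (pvGlue rest) (pre.length + seg.length + 1)
          (pre.length + wsP.length + rsl + 1) res' =
        pvLoopB rest (pre.length + seg.length + 1) res' := by
      intro res'
      have hs' : pre.length + wsP.length + rsl + 1 ≤ (pre ++ seg ++ ['\n']).length := by
        simp only [List.length_append, List.length_singleton]
        omega
      have hws' : ∀ j, pre.length + wsP.length + rsl + 1 ≤ j →
          j < (pre ++ seg ++ ['\n']).length →
          PySem.Chars.isspace (cs.getD j ' ') = true := by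
        intro j hj1 hj2
        simp only [List.length_append, List.length_singleton] at hj2
        by_cases hj : j = pre.length + seg.length
        · subst hj
          have hview : cs = (pre ++ seg) ++ ('\n' :: pvGlue rest) := by
            rw [hcs]
            simp
          have hidx : pre.length + seg.length = (pre ++ seg).length := by simp
          rw [hview, hidx, List.getD_append_right _ _ _ _ le_rfl]
          simp only [Nat.sub_self, List.getD_cons_zero]
          decide
        · have hj3 : j < pre.length + seg.length := by omega
          have hview : cs = (pre ++ wsP) ++ (mid ++ ('\n' :: pvGlue rest)) := by
            rw [hcs2]
            simp
          have hk1 : (pre ++ wsP).length ≤ j := by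
            simp only [List.length_append]
            omega
          rw [hview, List.getD_append_right _ _ _ _ hk1]
          have hk2 : j - (pre ++ wsP).length < mid.length := by
            simp only [List.length_append]
            omega
          rw [List.getD_append _ _ _ _ hk2]
          refine pv_rstrip_ws mid _ ?_ hk2
          simp only [List.length_append]
          rw [hrsl]
          omega
      have h := ih (pre ++ seg ++ ['\n']) (pre.length + wsP.length + rsl + 1) res'
        hcs' (fun t ht => hnl t (List.mem_cons_of_mem _ ht)) hs' hws'
      have hlp : (pre ++ seg ++ ['\n']).length = pre.length + seg.length + 1 := by
        simp only [List.length_append, List.length_singleton]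
      rw [hlp] at h
      exact h
    -- match the recorded span, then recurse
    by_cases hn : PySem.Chars.rstrip mid = []
    · have hrsl0 : rsl = 0 := by rw [← hrsl, hn]; rfl
      rw [if_neg (by omega), if_neg (by simp [hstrip, hn])]
      exact hcont res
    · have hrslpos : 0 < rsl := by
        rw [← hrsl]
        exact List.length_pos_iff.mpr hn
      have e1 : seg.length - (PySem.Chars.lstrip seg).length = wsP.length := by
        rw [← hmid]
        exact hwsPlen
      have e2 : (PySem.Chars.strip seg).length = rsl := by
        rw [hstrip, hrsl]
      rw [if_pos (by omega), if_pos (by simp [hstrip, hn]), e1, e2]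
      exact hcont _

-- ===== VERDICT (by name: the statement is the Claim_ definition above) =====
theorem find_sentence_boundaries_spec : Claim_equal_find_sentence_boundaries := by
  unfold Claim_equal_find_sentence_boundaries
  intro text _
  unfold Spec_find_sentence_boundaries find_sentence_boundaries find_sentence_boundaries_alt
  rw [pv_splitOn_eq]
  have hglue : pvGlue ((pvSplitP text.toList).1 :: (pvSplitP text.toList).2) =
      text.toList ++ ['\n'] := pv_glue_splitP text.toList
  have h := pv_main (text.toList ++ ['\n']) ((pvSplitP text.toList).1 :: (pvSplitP text.toList).2)
    [] 0 [] (by rw [hglue]; simp) (pv_no_nl text.toList) (by simp)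
    (by intro j h1 h2; simp at h2)
  rw [hglue] at h
  simpa using h
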